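-- pv_equiv track=rewrite | github.com/neutrak/neu-way-ui | scripts/line-diff.py | diff_patch
-- ===== SOURCE A (Python) =====
-- def diff_patch(start_str,diff_desc_str):
--     ret_str=''
--
--     start_idx=0
--     desc_idx=0
--     while(desc_idx<len(diff_desc_str)):
--
--         if(diff_desc_str[desc_idx]=='n'):
--             ret_str+=start_str[start_idx]
--             start_idx+=1
--             desc_idx+=1
--         elif(diff_desc_str[desc_idx]=='d'):
--             start_idx+=1
--             desc_idx+=1
--         elif(diff_desc_str[desc_idx]=='s'):
--             ret_str+=diff_desc_str[desc_idx+1]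
--             desc_idx+=2
--             start_idx+=1
--         elif(diff_desc_str[desc_idx]=='i'):
--             ret_str+=diff_desc_str[desc_idx+1]
--             desc_idx+=2
--
--     return ret_str
-- ===== SOURCE B (Python) =====
-- def diff_patch(start_str, diff_desc_str):
--     # pass 1: tokenize the edit script
--     tokens = []
--     i = 0
--     n = len(diff_desc_str)
--     while i < n:
--         op = diff_desc_str[i]
--         if op == 'n' or op == 'd':
--             tokens.append((op, ''))
--             i += 1
--         elif op == 's' or op == 'i':
--             tokens.append((op, diff_desc_str[i + 1]))
--             i += 2
--         # unknown opcode: no advance (matches A's behaviour)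
--     # pass 2: apply the tokens to start_str
--     out = []
--     pos = 0
--     for op, ch in tokens:
--         if op == 'n':
--             out.append(start_str[pos])
--             pos += 1
--         elif op == 'd':
--             pos += 1
--         elif op == 's':
--             out.append(ch)
--             pos += 1
--         else:  # 'i'
--             out.append(ch)
--     return ''.join(out)
-- ===== Notes on version B (the rewrite author's own statement) =====
-- stated objective: alternative
-- what changed: B splits A's single fused while-loop into two passes: an index-advancing tokenizer that parses the edit script into (opcode, char) tokens, then a separate application loop walking the token list with a start-position counter and joining an output list at the end.
import Mathlib
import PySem

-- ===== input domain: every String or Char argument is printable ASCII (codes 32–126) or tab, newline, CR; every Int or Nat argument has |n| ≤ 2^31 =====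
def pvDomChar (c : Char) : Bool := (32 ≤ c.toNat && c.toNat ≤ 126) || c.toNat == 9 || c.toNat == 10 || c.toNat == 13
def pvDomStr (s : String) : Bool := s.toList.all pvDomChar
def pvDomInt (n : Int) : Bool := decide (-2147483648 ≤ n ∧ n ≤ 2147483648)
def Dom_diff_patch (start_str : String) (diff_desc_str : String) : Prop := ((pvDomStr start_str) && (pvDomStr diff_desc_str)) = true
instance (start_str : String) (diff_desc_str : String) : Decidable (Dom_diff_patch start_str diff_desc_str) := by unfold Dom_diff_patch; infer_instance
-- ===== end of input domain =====

-- B replaces A's single fused while-loop with two passes (tokenize the edit script, then apply the tokens); same output, return-value equivalence proved on well-formed scripts.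


-- ===== PORT A =====
-- A's while-loop, fused parse+apply; `fuel` only makes the recursion total (Python
-- diverges on an unknown opcode: the loop does not advance — outside Pre_); a `none`
-- from pyGet? / a truncated 's'/'i' is Python's IndexError — outside Pre_.
def diffLoopA (start : List Char) (fuel : Nat) (ds : List Char) (sidx : Nat) (ret : List Char) : List Char :=
  match fuel with
  | 0 => ret
  | fuel + 1 =>
    match ds with
    | [] => ret
    | c :: rest =>
      if c = 'n' then
        match PySem.List.pyGet? start (sidx : Int) with
        | some ch => diffLoopA start fuel rest (sidx + 1) (ret ++ [ch])
        | none => ret          -- IndexError in Python (excluded by Pre_)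
      else if c = 'd' then diffLoopA start fuel rest (sidx + 1) ret
      else if c = 's' then
        match rest with
        | ch :: rest' => diffLoopA start fuel rest' (sidx + 1) (ret ++ [ch])
        | [] => ret            -- IndexError in Python (excluded by Pre_)
      else if c = 'i' then
        match rest with
        | ch :: rest' => diffLoopA start fuel rest' sidx (ret ++ [ch])
        | [] => ret            -- IndexError in Python (excluded by Pre_)
      else diffLoopA start fuel (c :: rest) sidx ret   -- unknown opcode: Python loops forever

def diff_patch (start_str : String) (diff_desc_str : String) : String :=
  String.ofList (diffLoopA start_str.toList diff_desc_str.toList.length diff_desc_str.toList 0 [])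

-- ===== PORT B =====
inductive DTok where
  | tn : DTok
  | td : DTok
  | ts : Char → DTok
  | ti : Char → DTok
deriving DecidableEq, Repr

-- B's pass 1: the tokenizer while-loop (same fuel device for the unknown-opcode non-advance).
def tokenizeB (fuel : Nat) (ds : List Char) : List DTok :=
  match fuel with
  | 0 => []
  | fuel + 1 =>
    match ds with
    | [] => []
    | c :: rest =>
      if c = 'n' then DTok.tn :: tokenizeB fuel rest
      else if c = 'd' then DTok.td :: tokenizeB fuel rest
      else if c = 's' then
        match rest with
        | ch :: rest' => DTok.ts ch :: tokenizeB fuel rest'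
        | [] => []             -- IndexError in Python (excluded by Pre_)
      else if c = 'i' then
        match rest with
        | ch :: rest' => DTok.ti ch :: tokenizeB fuel rest'
        | [] => []             -- IndexError in Python (excluded by Pre_)
      else tokenizeB fuel (c :: rest)

-- B's pass 2: the application for-loop, with its (out, pos) state as accumulators.
def applyB (start : List Char) : List DTok → Nat → List Char → List Char
  | [], _, out => out
  | DTok.tn :: ts, pos, out =>
      match PySem.List.pyGet? start (pos : Int) with
      | some ch => applyB start ts (pos + 1) (out ++ [ch])
      | none => out            -- IndexError in Python (excluded by Pre_)
  | DTok.td :: ts, pos, out => applyB start ts (pos + 1) out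
  | DTok.ts ch :: ts, pos, out => applyB start ts (pos + 1) (out ++ [ch])
  | DTok.ti ch :: ts, pos, out => applyB start ts pos (out ++ [ch])

def diff_patch_alt (start_str : String) (diff_desc_str : String) : String :=
  String.ofList (applyB start_str.toList (tokenizeB diff_desc_str.toList.length diff_desc_str.toList) 0 [])

-- ===== PRECONDITION & SPEC =====
-- Well-formedness checker for the edit script: every opcode is one of n/d/s/i (an
-- unknown opcode makes Python loop forever), every 's'/'i' has its argument character
-- (else IndexError), and every 'n' reads start_str in range (else IndexError).
def pvScriptOk (slen : Nat) : List Char → Nat → Bool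
  | [], _ => true
  | c :: rest, pos =>
    if c = 'n' then decide (pos < slen) && pvScriptOk slen rest (pos + 1)
    else if c = 'd' then pvScriptOk slen rest (pos + 1)
    else if c = 's' then
      match rest with
      | _ :: rest' => pvScriptOk slen rest' (pos + 1)
      | [] => false
    else if c = 'i' then
      match rest with
      | _ :: rest' => pvScriptOk slen rest' pos
      | [] => false
    else false

-- Pre_ = exactly the inputs on which Python A returns normally: a well-formed edit script.
def Pre_diff_patch (start_str : String) (diff_desc_str : String) : Prop :=
  pvScriptOk start_str.toList.length diff_desc_str.toList 0 = true
instance (start_str : String) (diff_desc_str : String) : Decidable (Pre_diff_patch start_str diff_desc_str) := by unfold Pre_diff_patch; infer_instance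

def pvWitness_diff_patch : String × String := ("abc", "nsxdiy")

def Spec_diff_patch (start_str : String) (diff_desc_str : String) (out : String) : Prop := out = diff_patch_alt start_str diff_desc_str
instance (start_str : String) (diff_desc_str : String) (out : String) : Decidable (Spec_diff_patch start_str diff_desc_str out) := by unfold Spec_diff_patch; infer_instance

-- ===== CLAIM (what is proved, stated in full; the proofs are below) =====
def Claim_equal_diff_patch : Prop := ∀ (start_str : String) (diff_desc_str : String), Dom_diff_patch start_str diff_desc_str → Pre_diff_patch start_str diff_desc_str → Spec_diff_patch start_str diff_desc_str (diff_patch start_str diff_desc_str)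

-- ===== LEMMAS AND PROOFS =====
-- A's fused loop equals B's tokenize-then-apply, for any fuel, state and accumulator
-- (the fallbacks on malformed input happen to align, so no well-formedness is needed here).
theorem diffLoopA_eq_applyB_tokenizeB (start : List Char) :
    ∀ (fuel : Nat) (ds : List Char) (sidx : Nat) (ret : List Char),
      diffLoopA start fuel ds sidx ret = applyB start (tokenizeB fuel ds) sidx ret := by
  intro fuel
  induction fuel with
  | zero => intro ds sidx ret; simp [diffLoopA, tokenizeB, applyB]
  | succ fuel ih =>
    intro ds sidx ret
    match ds with
    | [] => simp [diffLoopA, tokenizeB, applyB]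
    | c :: rest =>
      by_cases hn : c = 'n'
      · subst hn
        cases h : PySem.List.pyGet? start (sidx : Int) with
        | some ch => simp [diffLoopA, tokenizeB, applyB, h, ih]
        | none => simp [diffLoopA, tokenizeB, applyB, h]
      · by_cases hd : c = 'd'
        · simp [diffLoopA, tokenizeB, hd, applyB, ih]
        · by_cases hs : c = 's'
          · cases rest with
            | nil => simp [diffLoopA, tokenizeB, hs, applyB]
            | cons ch rest' => simp [diffLoopA, tokenizeB, hs, applyB, ih]
          · by_cases hi : c = 'i'
            · cases rest with
              | nil => simp [diffLoopA, tokenizeB, hi, applyB]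
              | cons ch rest' => simp [diffLoopA, tokenizeB, hi, applyB, ih]
            · simp [diffLoopA, tokenizeB, hn, hd, hs, hi, ih]

-- ===== VERDICT (by name: the statement is the Claim_ definition above) =====
theorem diff_patch_spec : Claim_equal_diff_patch := by
  intro start_str diff_desc_str _ _
  unfold Spec_diff_patch diff_patch diff_patch_alt
  rw [diffLoopA_eq_applyB_tokenizeB]
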